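-- pv_equiv track=rewrite | github.com/ClarityNLP/ClarityNLP | nlp/algorithms/segmentation/segmentation_helper.py | _insert_tokens
-- ===== SOURCE A (Python) =====
-- _DELIMITER = '&&'
--
-- def _make_token(token_text, counter):
--     """
--     Generate a token string for textual replacement.
--     """
--
--     token = '{0}{1}{2:04}{3}'.format(_DELIMITER, token_text,
--                                      counter, _DELIMITER)
--     return token
--
-- def _insert_tokens(report, token_text, tuple_list, sub_list):
--     """
--     The tuple_list is a list of (start, end, match_text) tuples. For each
--     tuple in this list, replace report[start:end] with a token created by
--     _make_token. Store the substitutions in sub_list and return the new report.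
--     """
--
--     if 0 == len(tuple_list):
--         return report
--
--     # generate tokens for each unique text
--     sub_list.clear()
--     token_map = dict()
--
--     counter = 0
--     for start, end, match_text in tuple_list:
--         if match_text in token_map:
--             continue
--         else:
--             token = _make_token(token_text, counter)
--             token_map[match_text] = token
--             sub_list.append( (token, match_text) )
--             counter += 1
--
--     # do token replacements
--     new_report = ''
--     prev_end = 0
--     for start, end, match_text in tuple_list:
--         chunk1 = report[prev_end:start]
--         assert match_text in token_map
--         token = token_map[match_text]
--         new_report += chunk1 + token
--         prev_end = end
--     new_report += report[prev_end:]
--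
--     return new_report
-- ===== SOURCE B (Python) =====
-- _DELIMITER = '&&'
--
-- def _insert_tokens(report, token_text, tuple_list, sub_list):
--     # Single pass: the token table is built lazily while the output chunks are
--     # collected, and the result is assembled with one ''.join.
--     if not tuple_list:
--         return report
--
--     sub_list.clear()
--     token_map = {}
--     parts = []
--     prev_end = 0
--     for start, end, match_text in tuple_list:
--         token = token_map.get(match_text)
--         if token is None:
--             token = _DELIMITER + token_text + str(len(token_map)).zfill(4) + _DELIMITER
--             token_map[match_text] = token
--             sub_list.append((token, match_text))
--         parts.append(report[prev_end:start])
--         parts.append(token)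
--         prev_end = end
--     parts.append(report[prev_end:])
--     return ''.join(parts)
-- ===== Notes on version B (the rewrite author's own statement) =====
-- stated objective: simpler
-- what changed: A builds the full token table in a first loop and then re-walks tuple_list concatenating with string +=; B does one pass that creates tokens lazily (counter = current table size) while collecting output chunks in a list, joined once at the end.
import Mathlib
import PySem

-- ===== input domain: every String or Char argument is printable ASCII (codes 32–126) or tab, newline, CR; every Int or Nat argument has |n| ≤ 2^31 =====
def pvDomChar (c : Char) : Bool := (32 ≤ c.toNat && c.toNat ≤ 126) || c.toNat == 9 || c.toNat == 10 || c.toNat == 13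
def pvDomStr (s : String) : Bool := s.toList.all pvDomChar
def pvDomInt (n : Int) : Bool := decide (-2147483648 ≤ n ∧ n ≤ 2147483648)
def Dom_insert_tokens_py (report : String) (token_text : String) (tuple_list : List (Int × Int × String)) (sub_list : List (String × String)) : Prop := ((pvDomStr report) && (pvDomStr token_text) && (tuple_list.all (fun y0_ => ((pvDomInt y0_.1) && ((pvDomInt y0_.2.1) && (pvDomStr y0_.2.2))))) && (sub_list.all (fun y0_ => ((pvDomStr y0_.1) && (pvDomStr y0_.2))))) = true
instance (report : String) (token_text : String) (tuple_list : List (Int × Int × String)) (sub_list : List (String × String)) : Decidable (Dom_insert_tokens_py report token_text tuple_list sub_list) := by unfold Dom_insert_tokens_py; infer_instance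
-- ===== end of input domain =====

-- ===== PORT A =====
-- B changes decomposition: one lazy-token pass collecting chunks joined once, instead of A's
-- build-table loop followed by a += concatenation loop (equivalence is about the RETURN value;
-- both Pythons also clear/refill sub_list identically, not modeled here).

-- A's _make_token: '{0}{1}{2:04}{3}'.format(...); '{:04}' on the nonnegative counter is str(c).zfill(4)
def pvMakeToken (token_text : String) (counter : Int) : List Char :=
  "&&".toList ++ token_text.toList ++ PySem.Chars.zfill (PySem.Int.toChars counter) 4 ++ "&&".toList

-- first loop of A: build token_map and counter
def pvBuildA (token_text : String) (p : PySem.Dict String (List Char) × Int)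
    (t : Int × Int × String) : PySem.Dict String (List Char) × Int :=
  if p.1.contains t.2.2 then p
  else (p.1.insert t.2.2 (pvMakeToken token_text p.2), p.2 + 1)

-- second loop of A: token replacement accumulating (new_report, prev_end)
def pvRenderA (report : String) (tm : PySem.Dict String (List Char))
    (p : List Char × Int) (t : Int × Int × String) : List Char × Int :=
  (p.1 ++ PySem.List.slice report.toList (some p.2) (some t.1) ++ tm.getD t.2.2 [], t.2.1)

def insert_tokens_py (report : String) (token_text : String) (tuple_list : List (Int × Int × String)) (sub_list : List (String × String)) : String :=
  if tuple_list.length = 0 then report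
  else
    let bm := tuple_list.foldl (pvBuildA token_text) (PySem.Dict.empty, 0)
    let r := tuple_list.foldl (pvRenderA report bm.1) ([], 0)
    String.ofList (r.1 ++ PySem.List.slice report.toList (some r.2) none)

-- ===== PORT B =====
-- B's single pass: state = (token_map, prev_end, parts)
def pvStepB (report : String) (token_text : String)
    (p : PySem.Dict String (List Char) × Int × List (List Char))
    (t : Int × Int × String) : PySem.Dict String (List Char) × Int × List (List Char) :=
  match p.1.get? t.2.2 with
  | some tok =>
      (p.1, t.2.1, p.2.2 ++ [PySem.List.slice report.toList (some p.2.1) (some t.1), tok])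
  | none =>
      let tok := "&&".toList ++ token_text.toList ++
        PySem.Chars.zfill (PySem.Int.toChars (p.1.size : Int)) 4 ++ "&&".toList
      (p.1.insert t.2.2 tok, t.2.1,
        p.2.2 ++ [PySem.List.slice report.toList (some p.2.1) (some t.1), tok])

def insert_tokens_py_alt (report : String) (token_text : String) (tuple_list : List (Int × Int × String)) (sub_list : List (String × String)) : String :=
  if tuple_list = [] then report
  else
    let r := tuple_list.foldl (pvStepB report token_text) (PySem.Dict.empty, 0, [])
    String.ofList ((r.2.2 ++ [PySem.List.slice report.toList (some r.2.1) none]).flatten)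

-- ===== PRECONDITION & SPEC =====
def Spec_insert_tokens_py (report : String) (token_text : String) (tuple_list : List (Int × Int × String)) (sub_list : List (String × String)) (out : String) : Prop := out = insert_tokens_py_alt report token_text tuple_list sub_list
instance (report : String) (token_text : String) (tuple_list : List (Int × Int × String)) (sub_list : List (String × String)) (out : String) : Decidable (Spec_insert_tokens_py report token_text tuple_list sub_list out) := by unfold Spec_insert_tokens_py; infer_instance

-- ===== CLAIM (what is proved, stated in full; the proofs are below) =====
def Claim_equal_insert_tokens_py : Prop := ∀ (report : String) (token_text : String) (tuple_list : List (Int × Int × String)) (sub_list : List (String × String)), Dom_insert_tokens_py report token_text tuple_list sub_list → Spec_insert_tokens_py report token_text tuple_list sub_list (insert_tokens_py report token_text tuple_list sub_list)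

-- ===== LEMMAS AND PROOFS =====

-- keys already present keep their value through pvBuildA
theorem pvBuildA_get?_mono (token_text : String) (ts : List (Int × Int × String)) :
    ∀ (p : PySem.Dict String (List Char) × Int) (k : String), p.1.contains k = true →
      (ts.foldl (pvBuildA token_text) p).1.get? k = p.1.get? k := by
  induction ts with
  | nil => intro p k _; rfl
  | cons t ts ih =>
    intro p k hk
    simp only [List.foldl_cons]
    by_cases h : p.1.contains t.2.2 = true
    · rw [show pvBuildA token_text p t = p by simp [pvBuildA, h]]
      exact ih p k hk
    · have hne : k ≠ t.2.2 := by
        intro he; rw [he] at hk; simp [hk] at h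
      have hstep : pvBuildA token_text p t
          = (p.1.insert t.2.2 (pvMakeToken token_text p.2), p.2 + 1) := by
        simp [pvBuildA, h]
      rw [hstep, ih _ k (by simp [PySem.Dict.contains_insert, hk]),
        PySem.Dict.get?_insert_of_ne _ _ hne]

-- main invariant: A's render pass over the full table equals B's single pass
theorem pvMain (report : String) (token_text : String) (ts : List (Int × Int × String)) :
    ∀ (d : PySem.Dict String (List Char)) (prev : Int) (parts : List (List Char)),
      (ts.foldl (pvRenderA report (ts.foldl (pvBuildA token_text) (d, (d.size : Int))).1)
          (parts.flatten, prev)).1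
        = (ts.foldl (pvStepB report token_text) (d, prev, parts)).2.2.flatten
      ∧ (ts.foldl (pvRenderA report (ts.foldl (pvBuildA token_text) (d, (d.size : Int))).1)
          (parts.flatten, prev)).2
        = (ts.foldl (pvStepB report token_text) (d, prev, parts)).2.1 := by
  induction ts with
  | nil => intro d prev parts; exact ⟨rfl, rfl⟩
  | cons t ts ih =>
    intro d prev parts
    simp only [List.foldl_cons]
    by_cases h : d.contains t.2.2 = true
    · -- key already in the table: A skips, B takes the `some` branch
      obtain ⟨tok, htok⟩ : ∃ tok, d.get? t.2.2 = some tok := by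
        rw [PySem.Dict.contains_eq_isSome_get?] at h
        exact Option.isSome_iff_exists.mp h
      have hb : pvBuildA token_text (d, (d.size : Int)) t = (d, (d.size : Int)) := by
        simp [pvBuildA, h]
      have hF : (ts.foldl (pvBuildA token_text) (d, (d.size : Int))).1.getD t.2.2 [] = tok := by
        rw [PySem.Dict.getD_eq_get?_getD, pvBuildA_get?_mono token_text ts _ _ h, htok]; rfl
      have hs : pvStepB report token_text (d, prev, parts) t
          = (d, t.2.1, parts ++ [PySem.List.slice report.toList (some prev) (some t.1), tok]) := by
        simp [pvStepB, htok]
      rw [hb, hs]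
      have := ih d t.2.1 (parts ++ [PySem.List.slice report.toList (some prev) (some t.1), tok])
      simpa [pvRenderA, hb, hF, List.flatten_append] using this
    · -- new key: both insert the SAME token (A's counter = B's table size)
      have hbne : d.contains t.2.2 = false := by simpa using h
      have htokeq : pvMakeToken token_text (d.size : Int)
          = "&&".toList ++ token_text.toList ++
            PySem.Chars.zfill (PySem.Int.toChars (d.size : Int)) 4 ++ "&&".toList := rfl
      set tok := pvMakeToken token_text (d.size : Int) with htokdef
      have hb : pvBuildA token_text (d, (d.size : Int)) t
          = (d.insert t.2.2 tok, (d.size : Int) + 1) := by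
        simp only [pvBuildA, hbne, Bool.false_eq_true, if_false, ← htokdef]
      have hget : d.get? t.2.2 = none := by
        rw [PySem.Dict.contains_eq_isSome_get?] at hbne
        exact Option.not_isSome_iff_eq_none.mp (by simp [hbne])
      have hs : pvStepB report token_text (d, prev, parts) t
          = (d.insert t.2.2 tok, t.2.1,
              parts ++ [PySem.List.slice report.toList (some prev) (some t.1), tok]) := by
        simp [pvStepB, hget, htokeq]
      have hsize : ((d.insert t.2.2 tok).size : Int) = (d.size : Int) + 1 := by
        rw [PySem.Dict.size_insert, hbne]; push_cast; simp
      have hF : (ts.foldl (pvBuildA token_text) (d.insert t.2.2 tok, (d.size : Int) + 1)).1.getD t.2.2 []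
          = tok := by
        rw [PySem.Dict.getD_eq_get?_getD,
          pvBuildA_get?_mono token_text ts _ _ (by simp),
          PySem.Dict.get?_insert_self]; rfl
      rw [hb, hs]
      have := ih (d.insert t.2.2 tok) t.2.1
        (parts ++ [PySem.List.slice report.toList (some prev) (some t.1), tok])
      rw [hsize] at this
      simpa [pvRenderA, hb, hF, List.flatten_append] using this

-- ===== VERDICT (by name: the statement is the Claim_ definition above) =====
theorem insert_tokens_py_spec : Claim_equal_insert_tokens_py := by
  intro report token_text tuple_list sub_list _
  unfold Spec_insert_tokens_py insert_tokens_py insert_tokens_py_alt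
  cases tuple_list with
  | nil => simp
  | cons t ts =>
    rw [if_neg (by simp : ¬(t :: ts).length = 0), if_neg (by simp : ¬(t :: ts = []))]
    have h := pvMain report token_text (t :: ts) PySem.Dict.empty 0 []
    simp only [List.flatten_nil] at h
    rw [show ((PySem.Dict.empty : PySem.Dict String (List Char)).size : Int) = 0 from rfl] at h
    dsimp only
    rw [h.1, h.2, List.flatten_append]
    simp
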